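-- pv_equiv track=rewrite | github.com/Cristian-F-M/Python-games-from-android | Blackjack/a.py | get_text_better
-- ===== SOURCE A (Python) =====
-- CARD_COLS = 15
--
-- CANT_DOTS = 3
--
-- def get_text_better(text, index):
--   max_length_text = CARD_COLS - 2 - 6
--   length_text = len(text)
--   new_text = ""
--
--   if length_text > max_length_text:
--     for i, l in enumerate(text):
--       if i < max_length_text:
--         new_text += l
--         continue
--
--       if i < max_length_text + CANT_DOTS:
--         new_text += "."
--         continue
--
--   length_text = len(new_text)
--
--   text = text if new_text == "" else new_text
--   new_text = ""
--   for i, l in enumerate(text):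
--     if i == -1:
--       continue
--     l = "_" if i > index else l
--     new_text += l
--   return new_text.upper()
-- ===== SOURCE B (Python) =====
-- CARD_COLS = 15
--
-- CANT_DOTS = 3
--
-- def get_text_better(text, index):
--   # closed-form: truncate to 7 chars + up to 3 dots, then mask the tail after `index` with '_'
--   max_length_text = CARD_COLS - 2 - 6
--   n = len(text)
--   if n > max_length_text:
--     text = text[:max_length_text] + "." * min(n - max_length_text, CANT_DOTS)
--   keep = max(0, min(index + 1, len(text)))
--   return (text[:keep] + "_" * (len(text) - keep)).upper()
-- ===== Notes on version B (the rewrite author's own statement) =====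
-- stated objective: simpler
-- what changed: Both per-character loops are replaced by closed-form string operations: the truncation becomes text[:7] + '.'*min(len-7,3) and the masking becomes a slice of the kept prefix plus '_'*rest, with the visible count computed as a clamped index; this removes the O(n^2) repeated string concatenation.
import Mathlib
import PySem

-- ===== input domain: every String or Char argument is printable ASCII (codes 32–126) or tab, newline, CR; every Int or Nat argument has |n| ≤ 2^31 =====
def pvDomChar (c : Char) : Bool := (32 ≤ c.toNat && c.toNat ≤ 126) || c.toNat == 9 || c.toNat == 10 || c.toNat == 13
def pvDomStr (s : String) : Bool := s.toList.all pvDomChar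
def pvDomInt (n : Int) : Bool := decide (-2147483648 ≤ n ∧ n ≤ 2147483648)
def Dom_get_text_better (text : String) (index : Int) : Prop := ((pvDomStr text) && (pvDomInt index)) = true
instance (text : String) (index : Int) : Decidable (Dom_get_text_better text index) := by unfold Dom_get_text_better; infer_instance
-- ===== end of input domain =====

-- B replaces A's two per-character loops by closed-form slicing and replication (objective: simpler).

-- ===== PORT A =====
-- literal transliteration of A: truncation loop over enumerate(text), then masking loop, then .upper()
def get_text_better (text : String) (index : Int) : String :=
  let max_length_text : Int := 15 - 2 - 6
  let length_text : Int := PySem.Str.len text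
  let new_text : List Char := []
  let new_text : List Char :=
    if length_text > max_length_text then
      (PySem.List.enumerate text.toList 0).foldl (fun acc (p : Int × Char) =>
        if p.1 < max_length_text then acc ++ [p.2]
        else if p.1 < max_length_text + 3 then acc ++ ['.']
        else acc) new_text
    else new_text
  let text2 : List Char := if new_text = [] then text.toList else new_text
  let new_text2 : List Char :=
    (PySem.List.enumerate text2 0).foldl (fun acc (p : Int × Char) =>
      if p.1 = -1 then acc
      else acc ++ [if p.1 > index then '_' else p.2]) []
  String.ofList (PySem.Chars.upper new_text2)

-- ===== PORT B =====
-- literal transliteration of B: text[:7] + '.'*min(n-7,3) if long, then slice + '_'*rest, .upper()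
def get_text_better_alt (text : String) (index : Int) : String :=
  let n : Int := PySem.Str.len text
  let t : List Char :=
    if n > 7 then
      PySem.List.slice text.toList none (some 7) ++ List.replicate (min (n - 7) 3).toNat '.'
    else text.toList
  let keep : Nat := (max 0 (min (index + 1) (t.length : Int))).toNat
  String.ofList (PySem.Chars.upper (t.take keep ++ List.replicate (t.length - keep) '_'))

-- ===== PRECONDITION & SPEC =====
def Spec_get_text_better (text : String) (index : Int) (out : String) : Prop := out = get_text_better_alt text index
instance (text : String) (index : Int) (out : String) : Decidable (Spec_get_text_better text index out) := by unfold Spec_get_text_better; infer_instance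

-- ===== CLAIM (what is proved, stated in full; the proofs are below) =====
def Claim_equal_get_text_better : Prop := ∀ (text : String) (index : Int), Dom_get_text_better text index → Spec_get_text_better text index (get_text_better text index)

-- ===== LEMMAS AND PROOFS =====

-- the per-element contribution of A's truncation loop
def pvTruncStep (p : Int × Char) : List Char :=
  if p.1 < 7 then [p.2] else if p.1 < 10 then ['.'] else []

theorem pvFlat_keep (xs : List Char) (s : Int) (h : 0 ≤ s) (h' : s + xs.length ≤ 7) :
    (PySem.List.enumerate xs s).flatMap pvTruncStep = xs := by
  induction xs generalizing s with
  | nil => simp [PySem.List.enumerate_nil]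
  | cons c t ih =>
    simp only [List.length_cons] at h'
    simp only [PySem.List.enumerate_cons, List.flatMap_cons, pvTruncStep]
    rw [if_pos (by push_cast at h' ⊢; omega), ih (s + 1) (by omega) (by push_cast at h' ⊢; omega)]
    rfl

theorem pvFlat_dots (xs : List Char) (s : Int) (h : 7 ≤ s) (h' : s + xs.length ≤ 10) :
    (PySem.List.enumerate xs s).flatMap pvTruncStep = List.replicate xs.length '.' := by
  induction xs generalizing s with
  | nil => simp [PySem.List.enumerate_nil]
  | cons c t ih =>
    simp only [List.length_cons] at h'
    simp only [PySem.List.enumerate_cons, List.flatMap_cons, pvTruncStep]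
    rw [if_neg (by omega), if_pos (by push_cast at h' ⊢; omega),
      ih (s + 1) (by omega) (by push_cast at h' ⊢; omega)]
    rfl

theorem pvFlat_drop (xs : List Char) (s : Int) (h : 10 ≤ s ∨ xs = []) :
    (PySem.List.enumerate xs s).flatMap pvTruncStep = [] := by
  induction xs generalizing s with
  | nil => simp [PySem.List.enumerate_nil]
  | cons c t ih =>
    rcases h with h | h
    · simp only [PySem.List.enumerate_cons, List.flatMap_cons, pvTruncStep]
      rw [if_neg (by omega), if_neg (by omega), ih (s + 1) (Or.inl (by omega))]
      rfl
    · exact absurd h (by simp)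

-- A's truncation loop in closed form, for len(text) > 7
theorem pvTrunc_closed (l : List Char) (hl : 7 < l.length) :
    (PySem.List.enumerate l 0).foldl (fun acc (p : Int × Char) =>
        if p.1 < 7 then acc ++ [p.2]
        else if p.1 < 10 then acc ++ ['.']
        else acc) [] = l.take 7 ++ List.replicate (min (l.length - 7) 3) '.' := by
  have hb : ∀ (acc : List Char), ∀ p ∈ PySem.List.enumerate l 0,
      (if p.1 < 7 then acc ++ [p.2] else if p.1 < 10 then acc ++ ['.'] else acc)
        = acc ++ pvTruncStep p := by
    intro acc p _; unfold pvTruncStep; split_ifs <;> simp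
  rw [PySem.List.foldl_congr_mem _ _ _ _ hb, PySem.List.foldl_append_eq_flatMap, List.nil_append]
  have ht7 : (l.take 7).length = 7 := by simp; omega
  have ht3 : ((l.drop 7).take 3).length = min 3 (l.length - 7) := by simp
  conv_lhs => rw [show l = l.take 7 ++ ((l.drop 7).take 3 ++ (l.drop 7).drop 3) by
    rw [List.take_append_drop, List.take_append_drop]]
  rw [PySem.List.enumerate_append, PySem.List.enumerate_append,
    List.flatMap_append, List.flatMap_append]
  rw [pvFlat_keep _ _ le_rfl (by rw [ht7]; norm_num)]
  rw [pvFlat_dots _ _ (by rw [ht7]; norm_num) (by rw [ht7, ht3]; push_cast; omega)]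
  rw [pvFlat_drop _ _ ?side]
  · rw [ht3, List.append_nil, Nat.min_comm]
  case side =>
    by_cases hle : l.length ≤ 10
    · right; rw [List.drop_drop]; exact List.drop_eq_nil_of_le (by omega)
    · left; rw [ht7, ht3]; push_cast; omega

-- A's masking loop in closed form
theorem pvMask_closed (l : List Char) (index : Int) :
    (PySem.List.enumerate l 0).foldl (fun acc (p : Int × Char) =>
      if p.1 = -1 then acc
      else acc ++ [if p.1 > index then '_' else p.2]) []
    = l.take (max 0 (min (index + 1) (l.length : Int))).toNat
      ++ List.replicate (l.length - (max 0 (min (index + 1) (l.length : Int))).toNat) '_' := by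
  set keep : Nat := (max 0 (min (index + 1) (l.length : Int))).toNat with hkeep
  have hstep : ∀ (acc : List Char), ∀ p ∈ PySem.List.enumerate l 0,
      (if p.1 = -1 then acc else acc ++ [if p.1 > index then '_' else p.2])
      = acc ++ [if p.1 > index then '_' else p.2] := by
    intro acc p hp
    rw [PySem.List.mem_enumerate_iff] at hp
    obtain ⟨k, hk, rfl⟩ := hp
    exact if_neg (by omega)
  rw [PySem.List.foldl_congr_mem _ _ _ _ hstep]
  rw [PySem.List.foldl_append_singleton_eq_map (f := fun p : Int × Char => if p.1 > index then '_' else p.2)]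
  rw [List.nil_append]
  apply List.ext_getElem
  · simp [hkeep]
  · intro k h1 h2
    simp only [List.length_map, PySem.List.length_enumerate] at h1
    simp only [List.getElem_map, PySem.List.getElem_enumerate]
    by_cases hk : k < keep
    · rw [List.getElem_append_left (by simp; omega)]
      rw [if_neg (by omega)]
      simp
    · rw [List.getElem_append_right (by simp; omega)]
      rw [if_pos (by omega)]
      simp

theorem get_text_better_eq (text : String) (index : Int) :
    get_text_better text index = get_text_better_alt text index := by
  unfold get_text_better get_text_better_alt
  simp only [PySem.Str.len_eq, show (15 - 2 - 6 : Int) = 7 from by norm_num, show ((7:Int) + 3) = 10 from by norm_num]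
  by_cases h : ((text.toList.length : Int) > 7)
  · simp only [if_pos h]
    have h7 : 7 < text.toList.length := by exact_mod_cast h
    rw [pvTrunc_closed text.toList h7]
    have hmin : ((min ((text.toList.length : Int) - 7) 3)).toNat = min (text.toList.length - 7) 3 := by
      omega
    have hslice : PySem.List.slice text.toList none (some 7) = text.toList.take 7 :=
      PySem.List.slice_to text.toList (by norm_num)
    have hne : text.toList.take 7 ++ List.replicate (min (text.toList.length - 7) 3) '.' ≠ [] := by
      intro hc
      have := congrArg List.length hc
      simp only [List.length_append, List.length_take, List.length_replicate, List.length_nil] at this; omega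
    rw [if_neg hne, pvMask_closed, hslice, hmin]
  · simp only [if_neg h, ite_true, pvMask_closed]

-- ===== VERDICT (by name: the statement is the Claim_ definition above) =====
theorem get_text_better_spec : Claim_equal_get_text_better := by
  intro text index _
  unfold Spec_get_text_better
  exact get_text_better_eq text index
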